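-- pv_equiv track=rewrite | github.com/ShmuelTreiger/AdventOfCode2021 | Day_15/Solution.py | multiply_board
-- ===== SOURCE A (Python) =====
-- def multiply_board(board, factor):
--     new_board = []
--     for _ in range(factor):
--         new_row = [[]] * factor
--         new_board.append(new_row)
--
--     current_coordinates = {(0, 0)}
--     while current_coordinates:
--         for coordinate in current_coordinates:
--             i, j = coordinate
--             new_board[i][j] = board
--
--         board = increment_board(board)
--         current_coordinates = increment_coordinates(current_coordinates, factor)
--
--     return combine_board(new_board)
--
-- def combine_board(multi_dimensional_board):
--     combined_board = []
--     for i in range(len(multi_dimensional_board)):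
--         row_of_boards = multi_dimensional_board[i]
--         left_most_board_in_row_of_boards = row_of_boards[0]
--         for j in range(1, len(row_of_boards)):
--             individual_board = row_of_boards[j]
--             for individual_row in range(len(individual_board)):
--                 left_most_board_in_row_of_boards[individual_row] += individual_board[individual_row]
--         combined_board += left_most_board_in_row_of_boards
--     return combined_board
--
-- def increment_coordinates(coordinates, maximum):
--     new_coordinates = set()
--     for coordinate in coordinates:
--         first_new_coordinate = tuple(map(sum, zip(coordinate, (1, 0))))
--         second_new_coordinate = tuple(map(sum, zip(coordinate, (0, 1))))
--
--         if first_new_coordinate[0] < maximum: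
--             new_coordinates.add(first_new_coordinate)
--         if second_new_coordinate[1] < maximum:
--             new_coordinates.add(second_new_coordinate)
--
--     return new_coordinates
--
-- def increment_board(board):
--     new_board = []
--     for row in board:
--         new_row = []
--         for col in row:
--             new_val = col + 1
--             if new_val == 10:
--                 new_val = 1
--             new_row.append(new_val)
--         new_board.append(new_row)
--     return new_board
-- ===== SOURCE B (Python) =====
-- def multiply_board(board, factor):
--     tiles = [board]
--     for _ in range(2 * factor - 2):
--         tiles.append(increment_board(tiles[-1]))
--     result = []
--     for ti in range(factor):
--         for r in range(len(board)):
--             row = []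
--             for tj in range(factor):
--                 row += tiles[ti + tj][r]
--             result.append(row)
--     return result
--
-- def increment_board(board):
--     new_board = []
--     for row in board:
--         new_row = []
--         for col in row:
--             new_val = col + 1
--             if new_val == 10:
--                 new_val = 1
--             new_row.append(new_val)
--         new_board.append(new_row)
--     return new_board
-- ===== Notes on version B (the rewrite author's own statement) =====
-- stated objective: simpler
-- what changed: Replaces A's diagonal coordinate-set frontier (which repeatedly re-increments and scatters shared board objects into a grid that a separate mutating combine pass then flattens) with a precomputed distance-indexed list of incremented tiles and one straight nested pass that emits each output row directly as a concatenation tiles[ti+tj][r].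
import Mathlib
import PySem

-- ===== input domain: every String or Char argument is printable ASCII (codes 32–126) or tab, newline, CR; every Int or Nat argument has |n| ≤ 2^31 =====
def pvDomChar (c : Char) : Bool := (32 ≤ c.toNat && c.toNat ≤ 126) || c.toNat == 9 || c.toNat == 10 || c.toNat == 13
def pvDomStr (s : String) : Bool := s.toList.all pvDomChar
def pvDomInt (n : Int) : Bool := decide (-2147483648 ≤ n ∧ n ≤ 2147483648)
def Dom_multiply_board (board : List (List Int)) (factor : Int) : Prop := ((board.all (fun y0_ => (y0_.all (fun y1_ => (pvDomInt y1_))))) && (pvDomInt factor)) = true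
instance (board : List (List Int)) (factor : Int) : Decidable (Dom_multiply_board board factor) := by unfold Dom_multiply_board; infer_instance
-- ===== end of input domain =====

-- B replaces A's coordinate-set diagonal frontier + mutating combine pass with a
-- distance-indexed tile table and one straight nested assembly pass (objective: simpler).
-- Equivalence is about the RETURN value only: Python A extends the rows of the caller's
-- `board` in place during combine_board; B does not mutate its argument.

-- ===== PORT A =====
-- increment_board (identical helper in both Python sources)
def incRow (row : List Int) : List Int :=
  row.foldl (fun acc c => acc ++ [if c + 1 = 10 then 1 else c + 1]) []

def incBoard (b : List (List Int)) : List (List Int) :=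
  b.foldl (fun acc r => acc ++ [incRow r]) []

-- Python's `l[i] = v` / `l[i]`; exact for 0 ≤ i < len l, the only indices A reaches inside Pre_
def setAt {α : Type} (l : List α) (i : Int) (v : α) : List α := l.set i.toNat v

def getAt {α : Type} (l : List α) (i : Int) (d : α) : α := l.getD i.toNat d

-- new_board[i][j] = board
def gridSet (nb : List (List (List (List Int)))) (i j : Int) (v : List (List Int)) :
    List (List (List (List Int))) :=
  setAt nb i (setAt (getAt nb i []) j v)

-- `for coordinate in current_coordinates: new_board[i][j] = board`
def assignAll (coords : List (Int × Int)) (board : List (List Int))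
    (nb : List (List (List (List Int)))) : List (List (List (List Int))) :=
  coords.foldl (fun nb c => gridSet nb c.1 c.2 board) nb

-- loop body of increment_coordinates
def incStep (maximum : Int) (nc : PySem.Set (Int × Int)) (c : Int × Int) : PySem.Set (Int × Int) :=
  let fst := (c.1 + 1, c.2)
  let snd := (c.1, c.2 + 1)
  let nc1 := if fst.1 < maximum then PySem.Set.add nc fst else nc
  if snd.2 < maximum then PySem.Set.add nc1 snd else nc1

-- increment_coordinates
def incCoords (coords : List (Int × Int)) (maximum : Int) : PySem.Set (Int × Int) :=
  coords.foldl (incStep maximum) PySem.Set.empty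

-- left_most[r] += individual_board[r]  for r in range(len(individual_board))
def extendLeft (left ind : List (List Int)) : List (List Int) :=
  (List.range ind.length).foldl (fun l r => l.set r (l.getD r [] ++ ind.getD r [])) left

-- combine_board
def combineBoard (mb : List (List (List (List Int)))) : List (List Int) :=
  mb.foldl (fun acc rob => acc ++ rob.tail.foldl extendLeft (rob.headD [])) []

-- the `while current_coordinates:` loop; fuel = (2*factor).toNat always suffices (the loop
-- runs 2*factor-1 times), so this is a mere totality guard, not an algorithm switch
def loopA : Nat → List (List (List (List Int))) → List (List Int) → List (Int × Int) → Int →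
    List (List (List (List Int)))
  | 0, nb, _, _, _ => nb
  | fuel + 1, nb, board, coords, factor =>
    if coords = [] then nb
    else loopA fuel (assignAll coords board nb) (incBoard board) (incCoords coords factor) factor

def multiply_board (board : List (List Int)) (factor : Int) : List (List Int) :=
  let nb0 := (PySem.List.pyRange 0 factor 1).foldl
    (fun nb _ => nb ++ [List.replicate factor.toNat ([] : List (List Int))]) []
  combineBoard (loopA (2 * factor).toNat nb0 board [((0 : Int), (0 : Int))] factor)

-- ===== PORT B =====
def multiply_board_alt (board : List (List Int)) (factor : Int) : List (List Int) :=
  let tiles := (PySem.List.pyRange 0 (2 * factor - 2) 1).foldl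
    (fun ts _ => ts ++ [incBoard (ts.getLast?.getD [])]) [board]
  (PySem.List.pyRange 0 factor 1).foldl (fun res ti =>
    (List.range board.length).foldl (fun res r =>
      res ++ [(PySem.List.pyRange 0 factor 1).foldl
        (fun row tj => row ++ ((tiles.getD (ti + tj).toNat []).getD r [])) []]) res) []

-- ===== PRECONDITION & SPEC =====
-- Pre_ excludes factor ≤ 0, where A raises IndexError (it indexes into an empty grid of tile slots).
def Pre_multiply_board (board : List (List Int)) (factor : Int) : Prop := 1 ≤ factor
instance (board : List (List Int)) (factor : Int) : Decidable (Pre_multiply_board board factor) := by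
  unfold Pre_multiply_board; infer_instance

def pvWitness_multiply_board : List (List Int) × Int := ([[1, 9], [8, 2]], 2)

def Spec_multiply_board (board : List (List Int)) (factor : Int) (out : List (List Int)) : Prop :=
  out = multiply_board_alt board factor
instance (board : List (List Int)) (factor : Int) (out : List (List Int)) :
    Decidable (Spec_multiply_board board factor out) := by unfold Spec_multiply_board; infer_instance

-- ===== CLAIM (what is proved, stated in full; the proofs are below) =====
def Claim_equal_multiply_board : Prop := ∀ (board : List (List Int)) (factor : Int),
  Dom_multiply_board board factor → Pre_multiply_board board factor →
  Spec_multiply_board board factor (multiply_board board factor)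

-- ===== LEMMAS AND PROOFS =====

-- the board incremented d times
def tileB (b : List (List Int)) (d : Nat) : List (List Int) := incBoard^[d] b

-- canonical common value: row r of output block i is the concatenation of row r of tiles i..i+F-1
def rowspec (b : List (List Int)) (F i r : Nat) : List Int :=
  ((List.range F).map (fun j => (tileB b (i + j)).getD r [])).flatten

def outspec (b : List (List Int)) (F : Nat) : List (List Int) :=
  (List.range F).flatMap (fun i => (List.range b.length).map (fun r => rowspec b F i r))

theorem incBoard_eq_map (b : List (List Int)) : incBoard b = b.map incRow := by
  unfold incBoard
  rw [PySem.List.foldl_append_singleton_eq_map]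
  simp

theorem length_incBoard (b : List (List Int)) : (incBoard b).length = b.length := by
  simp [incBoard_eq_map]

theorem length_tileB (b : List (List Int)) (d : Nat) : (tileB b d).length = b.length := by
  induction d with
  | zero => rfl
  | succ d ih =>
    rw [tileB, Function.iterate_succ_apply']
    rw [length_incBoard]; exact ih

theorem flatMap_congr_mem {α β : Type} (l : List α) (f g : α → List β)
    (h : ∀ a ∈ l, f a = g a) : l.flatMap f = l.flatMap g := by
  rw [List.flatMap_def, List.flatMap_def, List.map_congr_left h]

theorem tiles_fold (b : List (List Int)) (l : List Int) (k : Nat) :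
    l.foldl (fun ts _ => ts ++ [incBoard (ts.getLast?.getD [])])
      ((List.range (k + 1)).map (tileB b)) = (List.range (k + 1 + l.length)).map (tileB b) := by
  induction l generalizing k with
  | nil => simp
  | cons x l ih =>
    rw [List.foldl_cons]
    have hlast : (((List.range (k + 1)).map (tileB b)).getLast?) = some (tileB b k) := by
      rw [List.range_succ, List.map_append]; exact List.getLast?_concat
    rw [hlast]
    have hstep : ((List.range (k + 1)).map (tileB b)) ++ [incBoard ((some (tileB b k)).getD [])] =
        (List.range (k + 1 + 1)).map (tileB b) := by
      rw [List.range_succ (n := k + 1), List.map_append]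
      congr 1
      simp [tileB, ← Function.iterate_succ_apply' incBoard k b]
    rw [hstep, ih (k + 1)]
    congr 2
    simp
    omega

theorem B_eq_outspec (b : List (List Int)) (factor : Int) (h : 1 ≤ factor) :
    multiply_board_alt b factor = outspec b factor.toNat := by
  have hF : 1 ≤ factor.toNat := by omega
  have hfac : factor = (factor.toNat : Int) := by omega
  have hr1 : PySem.List.pyRange 0 factor 1 = List.map (fun k : Nat => (k : Int)) (List.range factor.toNat) := by
    rw [hfac]; exact PySem.List.pyRange_zero_natCast factor.toNat
  have hr2 : PySem.List.pyRange 0 (2 * factor - 2) 1 =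
      List.map (fun k : Nat => (k : Int)) (List.range (2 * factor.toNat - 2)) := by
    have h2 : 2 * factor - 2 = ((2 * factor.toNat - 2 : Nat) : Int) := by omega
    rw [h2]; exact PySem.List.pyRange_zero_natCast (2 * factor.toNat - 2)
  have htiles : ((List.map (fun k : Nat => (k : Int)) (List.range (2 * factor.toNat - 2))).foldl
      (fun ts _ => ts ++ [incBoard (ts.getLast?.getD [])]) [b]) =
      (List.range (2 * factor.toNat - 1)).map (tileB b) := by
    have h0 : [b] = (List.range 1).map (tileB b) := by simp [tileB]
    rw [h0, tiles_fold b _ 0]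
    congr 2
    simp
    omega
  simp only [multiply_board_alt]
  rw [hr2, htiles, hr1]
  simp only [List.foldl_map, PySem.List.foldl_append_singleton_eq_map,
    PySem.List.foldl_append_eq_flatMap, List.nil_append]
  unfold outspec
  refine flatMap_congr_mem _ _ _ ?_
  intro i hi
  rw [List.mem_range] at hi
  refine List.map_congr_left ?_
  intro r _
  unfold rowspec
  rw [List.flatMap_def]
  congr 1
  refine List.map_congr_left ?_
  intro j hj
  rw [List.mem_range] at hj
  have hcast : ((i : Int) + (j : Int)).toNat = i + j := by omega
  rw [hcast, PySem.List.getD_map_range (tileB b) _ _ _ (by omega)]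

-- the grid as a function of its (tile-row, tile-column) indices
def nbOf (F : Nat) (G : Nat → Nat → List (List Int)) : List (List (List (List Int))) :=
  (List.range F).map (fun i => (List.range F).map (fun j => G i j))

-- grid contents after the frontier has passed distance d
def Gd (b : List (List Int)) (d : Nat) : Nat → Nat → List (List Int) :=
  fun i j => if i + j < d then tileB b (i + j) else []

-- the coordinate frontier at distance d
def FrP (F d : Nat) (c : Int × Int) : Prop :=
  c.1 + c.2 = (d : Int) ∧ 0 ≤ c.1 ∧ c.1 < (F : Int) ∧ 0 ≤ c.2 ∧ c.2 < (F : Int)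

theorem nbOf_congr (F : Nat) (G G' : Nat → Nat → List (List Int))
    (h : ∀ i j, i < F → j < F → G i j = G' i j) : nbOf F G = nbOf F G' := by
  unfold nbOf
  refine List.map_congr_left ?_
  intro i hi
  rw [List.mem_range] at hi
  refine List.map_congr_left ?_
  intro j hj
  rw [List.mem_range] at hj
  exact h i j hi hj

theorem set_map_range {α : Type} (g : Nat → α) (F k : Nat) (v : α) :
    ((List.range F).map g).set k v = (List.range F).map (fun i => if i = k then v else g i) := by
  refine List.ext_getElem (by simp) ?_
  intro i h1 h2
  simp only [List.getElem_set, List.getElem_map, List.getElem_range]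
  by_cases hk : k = i
  · subst hk; simp
  · rw [if_neg hk, if_neg (fun hh => hk hh.symm)]

theorem gridSet_nbOf (F : Nat) (G : Nat → Nat → List (List Int)) (v : List (List Int))
    (i j : Nat) (hi : i < F) :
    gridSet (nbOf F G) (i : Int) (j : Int) v =
      nbOf F (fun a b' => if a = i ∧ b' = j then v else G a b') := by
  unfold gridSet setAt getAt nbOf
  simp only [Int.toNat_natCast]
  rw [PySem.List.getD_map_range _ _ _ _ hi]
  rw [set_map_range (fun j' => G i j') F j v]
  rw [set_map_range _ F i _]
  refine List.map_congr_left ?_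
  intro a _
  by_cases ha : a = i
  · subst ha
    rw [if_pos rfl]
    refine List.map_congr_left ?_
    intro b' _
    by_cases hb : b' = j <;> simp [hb]
  · rw [if_neg ha]
    refine List.map_congr_left ?_
    intro b' _
    simp [ha]

theorem assignAll_nbOf (F : Nat) (v : List (List Int)) (cs : List (Int × Int))
    (G : Nat → Nat → List (List Int))
    (hcs : ∀ c ∈ cs, 0 ≤ c.1 ∧ c.1 < (F : Int) ∧ 0 ≤ c.2 ∧ c.2 < (F : Int)) :
    assignAll cs v (nbOf F G) =
      nbOf F (fun a b' => if ((a : Int), (b' : Int)) ∈ cs then v else G a b') := by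
  induction cs generalizing G with
  | nil =>
    rw [assignAll, List.foldl_nil]
    apply nbOf_congr
    intro a b' _ _
    simp
  | cons c cs ih =>
    obtain ⟨h1, h2, h3, h4⟩ := hcs c (List.mem_cons_self ..)
    rw [assignAll, List.foldl_cons, ← assignAll]
    have e1 : (c.1, c.2) = ((c.1.toNat : Int), (c.2.toNat : Int)) := by
      have : ((c.1.toNat : Nat) : Int) = c.1 := Int.toNat_of_nonneg h1
      have : ((c.2.toNat : Nat) : Int) = c.2 := Int.toNat_of_nonneg h3
      simp_all
    have hgs : gridSet (nbOf F G) c.1 c.2 v =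
        nbOf F (fun a b' => if a = c.1.toNat ∧ b' = c.2.toNat then v else G a b') := by
      have := gridSet_nbOf F G v c.1.toNat c.2.toNat (by omega)
      rw [Int.toNat_of_nonneg h1, Int.toNat_of_nonneg h3] at this
      exact this
    rw [hgs, ih _ (fun c' h' => hcs c' (List.mem_cons_of_mem _ h'))]
    apply nbOf_congr
    intro a b' _ _
    by_cases hm : ((a : Int), (b' : Int)) ∈ cs
    · simp [hm, List.mem_cons]
    · simp only [List.mem_cons, hm, or_false]
      by_cases he : ((a : Int), (b' : Int)) = c
      · have hab : a = c.1.toNat ∧ b' = c.2.toNat := by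
          rw [Prod.ext_iff] at he
          constructor <;> omega
        rw [if_pos hab, if_pos he]
        simp
      · have hab : ¬(a = c.1.toNat ∧ b' = c.2.toNat) := by
          rintro ⟨rfl, rfl⟩
          apply he
          rw [Prod.ext_iff]
          constructor <;> omega
        rw [if_neg hab, if_neg he]
        simp

theorem mem_incStep (m : Int) (acc : PySem.Set (Int × Int)) (c : Int × Int) (y : Int × Int) :
    y ∈ incStep m acc c ↔
      y ∈ acc ∨ (y = (c.1 + 1, c.2) ∧ c.1 + 1 < m) ∨ (y = (c.1, c.2 + 1) ∧ c.2 + 1 < m) := by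
  unfold incStep
  by_cases hA : c.1 + 1 < m <;> by_cases hB : c.2 + 1 < m <;>
    simp [hA, hB, PySem.Set.mem_add] <;> tauto

theorem mem_foldl_incStep (m : Int) (cs : List (Int × Int)) :
    ∀ (acc : PySem.Set (Int × Int)) (y : Int × Int),
      y ∈ cs.foldl (incStep m) acc ↔
        y ∈ acc ∨ ∃ c ∈ cs, (y = (c.1 + 1, c.2) ∧ c.1 + 1 < m) ∨ (y = (c.1, c.2 + 1) ∧ c.2 + 1 < m) := by
  induction cs with
  | nil => intro acc y; simp
  | cons c cs ih =>
    intro acc y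
    rw [List.foldl_cons, ih, mem_incStep]
    simp only [List.mem_cons]
    constructor
    · rintro ((h | h | h) | ⟨c', hc', h⟩)
      · exact Or.inl h
      · exact Or.inr ⟨c, Or.inl rfl, Or.inl h⟩
      · exact Or.inr ⟨c, Or.inl rfl, Or.inr h⟩
      · exact Or.inr ⟨c', Or.inr hc', h⟩
    · rintro (h | ⟨c', rfl | hc', h⟩)
      · exact Or.inl (Or.inl h)
      · rcases h with h | h
        · exact Or.inl (Or.inr (Or.inl h))
        · exact Or.inl (Or.inr (Or.inr h))
      · exact Or.inr ⟨c', hc', h⟩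

theorem mem_incCoords (m : Int) (cs : List (Int × Int)) (y : Int × Int) :
    y ∈ incCoords cs m ↔
      ∃ c ∈ cs, (y = (c.1 + 1, c.2) ∧ c.1 + 1 < m) ∨ (y = (c.1, c.2 + 1) ∧ c.2 + 1 < m) := by
  unfold incCoords
  rw [mem_foldl_incStep]
  simp [PySem.Set.empty]

theorem frontier_step (F d : Nat) (cs : List (Int × Int))
    (hcs : ∀ y, y ∈ cs ↔ FrP F d y) :
    ∀ y, y ∈ incCoords cs (F : Int) ↔ FrP F (d + 1) y := by
  intro y
  rw [mem_incCoords]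
  constructor
  · rintro ⟨c, hc, ⟨rfl, hlt⟩ | ⟨rfl, hlt⟩⟩ <;>
      · rw [hcs] at hc
        obtain ⟨hs, p1, p2, p3, p4⟩ := hc
        refine ⟨?_, ?_, ?_, ?_, ?_⟩ <;> simp <;> push_cast <;> omega
  · rintro ⟨hs, h1, h2, h3, h4⟩
    by_cases hz : y.1 = 0
    · refine ⟨(y.1, y.2 - 1), ?_, Or.inr ⟨?_, ?_⟩⟩
      · rw [hcs]
        refine ⟨?_, ?_, ?_, ?_, ?_⟩ <;> simp <;> push_cast at hs ⊢ <;> omega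
      · have hy2 : y.2 - 1 + 1 = y.2 := by omega
        simp [hy2]
      · simp; omega
    · refine ⟨(y.1 - 1, y.2), ?_, Or.inl ⟨?_, ?_⟩⟩
      · rw [hcs]
        refine ⟨?_, ?_, ?_, ?_, ?_⟩ <;> simp <;> push_cast at hs ⊢ <;> omega
      · have hy1 : y.1 - 1 + 1 = y.1 := by omega
        simp [hy1]
      · simp; omega

theorem frontier_zero (F : Nat) (hF : 1 ≤ F) :
    ∀ y : Int × Int, y ∈ [((0 : Int), (0 : Int))] ↔ FrP F 0 y := by
  intro y
  simp only [List.mem_singleton, FrP, Prod.ext_iff]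
  constructor
  · rintro ⟨ha, hb⟩; refine ⟨?_, ?_, ?_, ?_, ?_⟩ <;> omega
  · rintro ⟨hs, h1, h2, h3, h4⟩; constructor <;> omega

theorem loop_run (b : List (List Int)) (F : Nat) (hF : 1 ≤ F) :
    ∀ (fuel d : Nat) (brd : List (List Int)) (cs : List (Int × Int)),
      brd = tileB b d → d ≤ 2 * F - 1 → 2 * F - 1 - d ≤ fuel →
      (∀ y, y ∈ cs ↔ FrP F d y) →
      loopA fuel (nbOf F (Gd b d)) brd cs (F : Int) = nbOf F (Gd b (2 * F - 1)) := by
  intro fuel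
  induction fuel with
  | zero =>
    intro d brd cs hbrd hd hfuel hcs
    have hde : d = 2 * F - 1 := by omega
    subst hde
    rfl
  | succ fuel ih =>
    intro d brd cs hbrd hd hfuel hcs
    subst hbrd
    by_cases hend : d = 2 * F - 1
    · have hnil : cs = [] := by
        rw [List.eq_nil_iff_forall_not_mem]
        intro y hy
        rw [hcs] at hy
        obtain ⟨hs, h1, h2, h3, h4⟩ := hy
        omega
      rw [hnil, hend]
      simp [loopA]
    · have hd' : d < 2 * F - 1 := by omega
      have hwit : (((min d (F - 1) : Nat) : Int), ((d - min d (F - 1) : Nat) : Int)) ∈ cs := by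
        rw [hcs]
        refine ⟨?_, ?_, ?_, ?_, ?_⟩ <;> simp <;> omega
      have hne : cs ≠ [] := List.ne_nil_of_mem hwit
      simp only [loopA, if_neg hne]
      have hassign : assignAll cs (tileB b d) (nbOf F (Gd b d)) = nbOf F (Gd b (d + 1)) := by
        rw [assignAll_nbOf F _ cs _ (fun c hc => by
          have := (hcs c).1 hc
          exact ⟨this.2.1, this.2.2.1, this.2.2.2.1, this.2.2.2.2⟩)]
        apply nbOf_congr
        intro a b' ha hb
        by_cases hm : ((a : Int), (b' : Int)) ∈ cs
        · rw [hcs] at hm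
          obtain ⟨hs, _, _, _, _⟩ := hm
          have hab : a + b' = d := by omega
          rw [if_pos ?_]
          · unfold Gd
            rw [if_pos (by omega), hab]
          · rw [hcs]
            refine ⟨?_, ?_, ?_, ?_, ?_⟩ <;> simp <;> omega
        · rw [if_neg hm]
          unfold Gd
          have hne2 : a + b' ≠ d := by
            intro hh
            apply hm
            rw [hcs]
            refine ⟨?_, ?_, ?_, ?_, ?_⟩ <;> simp <;> omega
          by_cases hlt : a + b' < d
          · rw [if_pos hlt, if_pos (by omega)]
          · rw [if_neg hlt, if_neg (by omega)]
      rw [hassign]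
      have hinc : incBoard (tileB b d) = tileB b (d + 1) := by
        rw [tileB, tileB]
        exact (Function.iterate_succ_apply' incBoard d b).symm
      rw [hinc]
      exact ih (d + 1) _ (incCoords cs (F : Int)) rfl (by omega) (by omega)
        (frontier_step F d cs hcs)

theorem self_eq_map_getD (l : List (List Int)) :
    (List.range l.length).map (fun r => l.getD r []) = l := by
  refine List.ext_getElem (by simp) ?_
  intro i h1 h2
  simp only [List.getElem_map, List.getElem_range]
  exact List.getD_eq_getElem l [] h2

theorem foldl_set_range (n : Nat) (l : List (List Int)) (g : Nat → List Int) (h : n ≤ l.length) :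
    (List.range n).foldl (fun l' r => l'.set r (l'.getD r [] ++ g r)) l =
    ((List.range n).map (fun r => l.getD r [] ++ g r)) ++ l.drop n := by
  induction n with
  | zero => simp
  | succ n ih =>
    rw [List.range_succ, List.foldl_append, List.foldl_cons, List.foldl_nil, ih (by omega)]
    have hMlen : ((List.range n).map (fun r => l.getD r [] ++ g r)).length = n := by simp
    have hgetD : (((List.range n).map (fun r => l.getD r [] ++ g r)) ++ l.drop n).getD n [] =
        l.getD n [] := by
      rw [List.getD_eq_getElem?_getD, List.getElem?_append_right (by omega), hMlen,
        Nat.sub_self, List.getElem?_drop, Nat.add_zero, ← List.getD_eq_getElem?_getD]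
    rw [hgetD, List.set_append, if_neg (by omega), hMlen, Nat.sub_self,
      List.drop_eq_getElem_cons (show n < l.length by omega)]
    rw [show (l[n] :: l.drop (n + 1)).set 0 (l.getD n [] ++ g n) =
        (l.getD n [] ++ g n) :: l.drop (n + 1) from rfl]
    simp [List.append_assoc]

theorem extendLeft_eq (left ind : List (List Int)) (h : ind.length = left.length) :
    extendLeft left ind =
      (List.range left.length).map (fun r => left.getD r [] ++ ind.getD r []) := by
  unfold extendLeft
  rw [h, foldl_set_range left.length left _ le_rfl]
  simp

theorem chain_foldl (N : Nat) (ms : List (List (List Int))) :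
    ∀ acc : List (List Int), acc.length = N → (∀ m ∈ ms, m.length = N) →
      ms.foldl extendLeft acc =
        (List.range N).map (fun r => acc.getD r [] ++ (ms.map (fun m => m.getD r [])).flatten) := by
  induction ms with
  | nil =>
    intro acc hacc _
    simp only [List.foldl_nil, List.map_nil, List.flatten_nil, List.append_nil]
    rw [← hacc]
    exact (self_eq_map_getD acc).symm
  | cons m ms ih =>
    intro acc hacc hms
    rw [List.foldl_cons,
      extendLeft_eq acc m (by rw [hacc]; exact hms m (List.mem_cons_self ..)), hacc,
      ih _ (by simp) (fun m' h' => hms m' (List.mem_cons_of_mem _ h'))]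
    refine List.map_congr_left ?_
    intro r hr
    rw [List.mem_range] at hr
    rw [PySem.List.getD_map_range _ _ _ _ hr]
    simp [List.append_assoc]

theorem combine_grid (b : List (List Int)) (F : Nat) (hF : 1 ≤ F) :
    combineBoard ((List.range F).map (fun i => (List.range F).map (fun j => tileB b (i + j)))) =
      outspec b F := by
  obtain ⟨K, rfl⟩ : ∃ K, F = K + 1 := ⟨F - 1, by omega⟩
  unfold combineBoard outspec
  rw [List.foldl_map, PySem.List.foldl_append_eq_flatMap, List.nil_append]
  refine flatMap_congr_mem _ _ _ ?_
  intro i hi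
  rw [List.mem_range] at hi
  have hrow : (List.range (K + 1)).map (fun j => tileB b (i + j)) =
      tileB b (i + 0) :: (List.range K).map (fun j => tileB b (i + Nat.succ j)) := by
    rw [List.range_succ_eq_map, List.map_cons, List.map_map]
    rfl
  rw [hrow]
  simp only [List.tail_cons, List.headD_cons]
  rw [chain_foldl b.length _ (tileB b (i + 0)) (length_tileB b (i + 0)) ?hms]
  case hms =>
    intro m hm
    rw [List.mem_map] at hm
    obtain ⟨j, _, rfl⟩ := hm
    exact length_tileB b _
  refine List.map_congr_left ?_
  intro r hr
  unfold rowspec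
  rw [List.range_succ_eq_map, List.map_cons, List.flatten_cons, List.map_map, List.map_map]
  rfl

theorem A_eq_outspec (b : List (List Int)) (factor : Int) (h : 1 ≤ factor) :
    multiply_board b factor = outspec b factor.toNat := by
  obtain ⟨F, rfl⟩ : ∃ F : Nat, factor = (F : Int) := ⟨factor.toNat, by omega⟩
  have hF : 1 ≤ F := by exact_mod_cast h
  simp only [multiply_board, Int.toNat_natCast]
  rw [PySem.List.pyRange_zero_natCast F]
  have hnb0 : (List.map (fun k : Nat => (k : Int)) (List.range F)).foldl
      (fun nb _ => nb ++ [List.replicate F ([] : List (List Int))]) [] =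
      nbOf F (Gd b 0) := by
    rw [List.foldl_map, PySem.List.foldl_append_singleton_eq_map
      (fun _ : Nat => List.replicate F ([] : List (List Int))), List.nil_append]
    unfold nbOf
    refine List.map_congr_left ?_
    intro i _
    rw [show (List.range F).map (fun j => Gd b 0 i j) =
        (List.range F).map (fun _ => ([] : List (List Int))) from
      List.map_congr_left (fun j _ => by unfold Gd; rw [if_neg (by omega)])]
    rw [List.map_const']
    simp
  rw [hnb0]
  rw [loop_run b F hF ((2 * (F : Int)).toNat) 0 b [((0 : Int), (0 : Int))] rfl
    (by omega) (by omega) (frontier_zero F hF)]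
  have hgrid : nbOf F (Gd b (2 * F - 1)) =
      (List.range F).map (fun i => (List.range F).map (fun j => tileB b (i + j))) := by
    rw [nbOf_congr F (Gd b (2 * F - 1)) (fun i j => tileB b (i + j))
      (fun i j hi hj => by unfold Gd; rw [if_pos (by omega)])]
    rfl
  rw [hgrid]
  exact combine_grid b F hF

-- ===== VERDICT (by name: the statement is the Claim_ definition above) =====
theorem multiply_board_spec : Claim_equal_multiply_board := by
  intro board factor _ hpre
  unfold Spec_multiply_board
  rw [A_eq_outspec board factor hpre, B_eq_outspec board factor hpre]
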